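-- pv_equiv track=rewrite | github.com/Zi-Ai-tech/visa-api | app/services/comparison_service.py | _find_best_for_categories
-- ===== SOURCE A (Python) =====
-- from typing import List, Dict, Any, Optional
--
-- def _find_best_for_categories(matrix: Dict[str, Any], countries_data: List[Dict[str, Any]]) -> Dict[str, str]:
--     """Find best country for specific visa categories"""
--     best_for = {}
--
--     # Student visa
--     student_data = [d for d in countries_data if d.get("visa_type") == "student"]
--     if student_data:
--         best_for["student"] = student_data[0].get("country")
--
--     # Work visa
--     work_data = [d for d in countries_data if d.get("visa_type") == "work"]
--     if work_data:
--         best_for["work"] = work_data[0].get("country")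
--
--     # Tourist visa
--     tourist_data = [d for d in countries_data if d.get("visa_type") == "tourist"]
--     if tourist_data:
--         best_for["tourist"] = tourist_data[0].get("country")
--
--     return best_for
-- ===== SOURCE B (Python) =====
-- def _find_best_for_categories(matrix, countries_data):
--     """Find best country for specific visa categories (single scan)."""
--     targets = ("student", "work", "tourist")
--     found = {}
--     for d in countries_data:
--         vt = d.get("visa_type")
--         if vt in targets and vt not in found:
--             found[vt] = d.get("country")
--     return {c: found[c] for c in targets if c in found}
-- ===== Notes on version B (the rewrite author's own statement) =====
-- stated objective: simpler
-- what changed: One scan over countries_data recording the first country per target category in a dict, then emitting the categories in fixed order, instead of three separate filter passes over the whole list.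
-- outside the precondition, e.g. on _find_best_for_categories({}, [{'visa_type': 'student'}]): A returns {'student': None}, B returns {'student': None}
import Mathlib
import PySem

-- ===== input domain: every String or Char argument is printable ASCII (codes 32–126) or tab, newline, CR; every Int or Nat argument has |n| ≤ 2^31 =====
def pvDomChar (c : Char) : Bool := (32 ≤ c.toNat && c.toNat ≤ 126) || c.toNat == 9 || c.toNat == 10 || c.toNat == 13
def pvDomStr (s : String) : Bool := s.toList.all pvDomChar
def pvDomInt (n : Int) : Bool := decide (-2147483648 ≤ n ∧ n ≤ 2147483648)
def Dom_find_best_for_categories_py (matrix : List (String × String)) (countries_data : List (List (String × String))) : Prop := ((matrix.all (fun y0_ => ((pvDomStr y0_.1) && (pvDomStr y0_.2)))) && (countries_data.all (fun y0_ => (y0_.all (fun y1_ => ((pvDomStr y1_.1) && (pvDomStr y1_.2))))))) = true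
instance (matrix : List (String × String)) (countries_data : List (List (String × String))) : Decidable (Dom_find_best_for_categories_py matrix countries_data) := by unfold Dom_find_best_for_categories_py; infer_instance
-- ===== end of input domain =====

-- B changes the algorithm: one scan recording the first country per target category, instead of
-- three separate filter passes (objective: simpler).  Equivalence is claimed on Pre_: inputs where
-- every record of a target visa_type carries a "country" key (otherwise Python puts None, not a
-- str, in the result dict).

-- shared helper: `d.get(k)` on an input dict given as an association list (dict(pairs): last value wins)
def pvGet (d : List (String × String)) (k : String) : Option String :=
  (PySem.Dict.ofList d).get? k

-- ===== PORT A =====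
def find_best_for_categories_py (matrix : List (String × String)) (countries_data : List (List (String × String))) : List (String × String) :=
  let best_for : PySem.Dict String String := PySem.Dict.empty
  let student_data := countries_data.filter (fun d => pvGet d "visa_type" == some "student")
  let best_for := match student_data with
    | [] => best_for
    | x :: _ => best_for.insert "student" ((pvGet x "country").getD "")  -- .getD "" : exact under Pre_ (country present)
  let work_data := countries_data.filter (fun d => pvGet d "visa_type" == some "work")
  let best_for := match work_data with
    | [] => best_for
    | x :: _ => best_for.insert "work" ((pvGet x "country").getD "")
  let tourist_data := countries_data.filter (fun d => pvGet d "visa_type" == some "tourist")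
  let best_for := match tourist_data with
    | [] => best_for
    | x :: _ => best_for.insert "tourist" ((pvGet x "country").getD "")
  best_for.items

-- ===== PORT B =====
def pvIsTarget (vt : String) : Bool :=
  vt == "student" || vt == "work" || vt == "tourist"

def pvStep (f : PySem.Dict String String) (d : List (String × String)) : PySem.Dict String String :=
  match pvGet d "visa_type" with
  | some vt =>
      if pvIsTarget vt && !(f.contains vt)
      then f.insert vt ((pvGet d "country").getD "")  -- .getD "" : exact under Pre_
      else f
  | none => f

def find_best_for_categories_py_alt (matrix : List (String × String)) (countries_data : List (List (String × String))) : List (String × String) :=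
  let found := countries_data.foldl pvStep PySem.Dict.empty
  (["student", "work", "tourist"].filter (fun c => found.contains c)).map
    (fun c => (c, (found.get? c).getD ""))

-- ===== PRECONDITION & SPEC =====
-- Pre_ excludes inputs on which A returns a dict value that is None rather than a str (a record of a
-- target visa_type without a "country" key): that value leaves the declared Dict[str, str] type.
def Pre_find_best_for_categories_py (matrix : List (String × String)) (countries_data : List (List (String × String))) : Prop :=
  ∀ d ∈ countries_data,
    (pvGet d "visa_type" = some "student" ∨ pvGet d "visa_type" = some "work" ∨
     pvGet d "visa_type" = some "tourist") → (pvGet d "country").isSome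
instance (matrix : List (String × String)) (countries_data : List (List (String × String))) : Decidable (Pre_find_best_for_categories_py matrix countries_data) := by unfold Pre_find_best_for_categories_py; infer_instance

def pvWitness_find_best_for_categories_py : (List (String × String)) × (List (List (String × String))) :=
  ([], [[("visa_type", "student"), ("country", "FR")], [("visa_type", "work"), ("country", "DE")]])

def Spec_find_best_for_categories_py (matrix : List (String × String)) (countries_data : List (List (String × String))) (out : List (String × String)) : Prop := out = find_best_for_categories_py_alt matrix countries_data
instance (matrix : List (String × String)) (countries_data : List (List (String × String))) (out : List (String × String)) : Decidable (Spec_find_best_for_categories_py matrix countries_data out) := by unfold Spec_find_best_for_categories_py; infer_instance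

-- ===== CLAIM (what is proved, stated in full; the proofs are below) =====
def Claim_equal_find_best_for_categories_py : Prop := ∀ (matrix : List (String × String)) (countries_data : List (List (String × String))), Dom_find_best_for_categories_py matrix countries_data → Pre_find_best_for_categories_py matrix countries_data → Spec_find_best_for_categories_py matrix countries_data (find_best_for_categories_py matrix countries_data)

-- ===== LEMMAS AND PROOFS =====

-- the fold's lookup at a target category: the accumulator's value if present, else the first matching record's country
theorem pvFold_get (cd : List (List (String × String))) (f : PySem.Dict String String) (c : String)
    (hc : pvIsTarget c = true) :
    (cd.foldl pvStep f).get? c =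
      (f.get? c).orElse (fun _ =>
        ((cd.filter (fun d => pvGet d "visa_type" == some c)).head?).map
          (fun x => (pvGet x "country").getD "")) := by
  induction cd generalizing f with
  | nil => cases h : f.get? c <;> simp [Option.orElse, h]
  | cons d cd ih =>
    simp only [List.foldl_cons, List.filter_cons]
    rw [ih (pvStep f d)]
    unfold pvStep
    cases hv : pvGet d "visa_type" with
    | none => simp
    | some vt =>
      by_cases hvc : vt = c
      · subst hvc
        simp only [hc, Bool.true_and]
        cases hf : f.contains vt with
        | true =>
          have hg : (f.get? vt).isSome := by rw [← PySem.Dict.contains_eq_isSome_get?]; exact hf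
          obtain ⟨v, hv2⟩ := Option.isSome_iff_exists.mp hg
          simp [hv2, Option.orElse]
        | false =>
          have hg : f.get? vt = none := by
            have h2 := PySem.Dict.contains_eq_isSome_get? (d := f) (k := vt)
            rw [hf] at h2
            exact Option.not_isSome_iff_eq_none.mp (by simp [← h2])
          simp [hg, PySem.Dict.get?_insert_self, Option.orElse]
      · have hne : (some vt == some c) = false := by
          cases h : (some vt == some c) with
          | false => rfl
          | true => exact absurd (by simpa using (eq_of_beq h)) hvc
        have hstep : (if pvIsTarget vt && !f.contains vt
              then f.insert vt ((pvGet d "country").getD "")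
              else f).get? c = f.get? c := by
          split
          · exact PySem.Dict.get?_insert_of_ne f _ (Ne.symm hvc)
          · rfl
        rw [hstep]
        simp [hne]

theorem find_best_for_categories_py_spec : Claim_equal_find_best_for_categories_py := by
  intro matrix cd _ _
  unfold Spec_find_best_for_categories_py
  unfold find_best_for_categories_py find_best_for_categories_py_alt
  have hs := pvFold_get cd PySem.Dict.empty "student" (by decide)
  have hw := pvFold_get cd PySem.Dict.empty "work" (by decide)
  have ht := pvFold_get cd PySem.Dict.empty "tourist" (by decide)
  simp only [PySem.Dict.get?_empty, Option.orElse] at hs hw ht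
  have cs := PySem.Dict.contains_eq_isSome_get? (d := cd.foldl pvStep PySem.Dict.empty) (k := "student")
  have cw := PySem.Dict.contains_eq_isSome_get? (d := cd.foldl pvStep PySem.Dict.empty) (k := "work")
  have ct := PySem.Dict.contains_eq_isSome_get? (d := cd.foldl pvStep PySem.Dict.empty) (k := "tourist")
  cases hS : cd.filter (fun d => pvGet d "visa_type" == some "student") with
  | nil =>
    rw [hS] at hs; simp only [List.head?_nil, Option.map_none] at hs
    cases hW : cd.filter (fun d => pvGet d "visa_type" == some "work") with
    | nil =>
      rw [hW] at hw; simp only [List.head?_nil, Option.map_none] at hw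
      cases hT : cd.filter (fun d => pvGet d "visa_type" == some "tourist") with
      | nil =>
        rw [hT] at ht; simp only [List.head?_nil, Option.map_none] at ht
        rw [hs] at cs; rw [hw] at cw; rw [ht] at ct
        simp only [PySem.Dict.empty] at hs hw ht cs cw ct
        simp [hs, hw, ht, cs, cw, ct, List.filter, PySem.Dict.empty, PySem.Dict.items]
      | cons x xs =>
        rw [hT] at ht; simp only [List.head?_cons, Option.map_some] at ht
        rw [hs] at cs; rw [hw] at cw; rw [ht] at ct
        simp only [PySem.Dict.empty] at hs hw ht cs cw ct
        simp [hs, hw, ht, cs, cw, ct, List.filter, PySem.Dict.empty, PySem.Dict.insert,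
          PySem.Dict.items, PySem.Dict.getD_eq_get?_getD]
    | cons y ys =>
      rw [hW] at hw; simp only [List.head?_cons, Option.map_some] at hw
      cases hT : cd.filter (fun d => pvGet d "visa_type" == some "tourist") with
      | nil =>
        rw [hT] at ht; simp only [List.head?_nil, Option.map_none] at ht
        rw [hs] at cs; rw [hw] at cw; rw [ht] at ct
        simp only [PySem.Dict.empty] at hs hw ht cs cw ct
        simp [hs, hw, ht, cs, cw, ct, List.filter, PySem.Dict.empty, PySem.Dict.insert,
          PySem.Dict.items, PySem.Dict.getD_eq_get?_getD]
      | cons x xs =>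
        rw [hT] at ht; simp only [List.head?_cons, Option.map_some] at ht
        rw [hs] at cs; rw [hw] at cw; rw [ht] at ct
        simp only [PySem.Dict.empty] at hs hw ht cs cw ct
        simp [hs, hw, ht, cs, cw, ct, List.filter, PySem.Dict.empty, PySem.Dict.insert,
          PySem.Dict.items, PySem.Dict.getD_eq_get?_getD]
  | cons z zs =>
    rw [hS] at hs; simp only [List.head?_cons, Option.map_some] at hs
    cases hW : cd.filter (fun d => pvGet d "visa_type" == some "work") with
    | nil =>
      rw [hW] at hw; simp only [List.head?_nil, Option.map_none] at hw
      cases hT : cd.filter (fun d => pvGet d "visa_type" == some "tourist") with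
      | nil =>
        rw [hT] at ht; simp only [List.head?_nil, Option.map_none] at ht
        rw [hs] at cs; rw [hw] at cw; rw [ht] at ct
        simp only [PySem.Dict.empty] at hs hw ht cs cw ct
        simp [hs, hw, ht, cs, cw, ct, List.filter, PySem.Dict.empty, PySem.Dict.insert,
          PySem.Dict.items, PySem.Dict.getD_eq_get?_getD]
      | cons x xs =>
        rw [hT] at ht; simp only [List.head?_cons, Option.map_some] at ht
        rw [hs] at cs; rw [hw] at cw; rw [ht] at ct
        simp only [PySem.Dict.empty] at hs hw ht cs cw ct
        simp [hs, hw, ht, cs, cw, ct, List.filter, PySem.Dict.empty, PySem.Dict.insert,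
          PySem.Dict.items, PySem.Dict.getD_eq_get?_getD]
    | cons y ys =>
      rw [hW] at hw; simp only [List.head?_cons, Option.map_some] at hw
      cases hT : cd.filter (fun d => pvGet d "visa_type" == some "tourist") with
      | nil =>
        rw [hT] at ht; simp only [List.head?_nil, Option.map_none] at ht
        rw [hs] at cs; rw [hw] at cw; rw [ht] at ct
        simp only [PySem.Dict.empty] at hs hw ht cs cw ct
        simp [hs, hw, ht, cs, cw, ct, List.filter, PySem.Dict.empty, PySem.Dict.insert,
          PySem.Dict.items, PySem.Dict.getD_eq_get?_getD]
      | cons x xs =>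
        rw [hT] at ht; simp only [List.head?_cons, Option.map_some] at ht
        rw [hs] at cs; rw [hw] at cw; rw [ht] at ct
        simp only [PySem.Dict.empty] at hs hw ht cs cw ct
        simp [hs, hw, ht, cs, cw, ct, List.filter, PySem.Dict.empty, PySem.Dict.insert,
          PySem.Dict.items, PySem.Dict.getD_eq_get?_getD]
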